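-- pv_equiv track=rewrite | github.com/leecaleb/d78a8d | server/messenger_backend/views/api/conversations.py | countUnreadMessages
-- ===== SOURCE A (Python) =====
-- def countUnreadMessages(user_id, messages, last_read_message_id):
--     n = len(messages)
--     cnt = 0
--     for i in range(n-1, -1, -1):
--         message = messages[i]
--         if message["id"] == last_read_message_id:
--             break
--
--         if message["senderId"] != user_id:
--             # sender is the other user, increment count
--             cnt += 1
--     return cnt
-- ===== SOURCE B (Python) =====
-- def countUnreadMessages(user_id, messages, last_read_message_id):
--     # Two passes: find the index of the LAST read message, then count the
--     # other user's messages in the suffix after it.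
--     boundary = -1
--     for i, message in enumerate(messages):
--         if message.get("id") == last_read_message_id:
--             boundary = i
--     cnt = 0
--     for message in messages[boundary + 1:]:
--         if message["senderId"] != user_id:
--             cnt += 1
--     return cnt
-- ===== Notes on version B (the rewrite author's own statement) =====
-- stated objective: alternative
-- what changed: A's single backward scan with a break is replaced by two forward passes: first find the index of the last message whose id equals last_read_message_id (default -1, using .get so unread-side messages without an id are skipped), then count messages with senderId != user_id in the suffix after that index.
import Mathlib
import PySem

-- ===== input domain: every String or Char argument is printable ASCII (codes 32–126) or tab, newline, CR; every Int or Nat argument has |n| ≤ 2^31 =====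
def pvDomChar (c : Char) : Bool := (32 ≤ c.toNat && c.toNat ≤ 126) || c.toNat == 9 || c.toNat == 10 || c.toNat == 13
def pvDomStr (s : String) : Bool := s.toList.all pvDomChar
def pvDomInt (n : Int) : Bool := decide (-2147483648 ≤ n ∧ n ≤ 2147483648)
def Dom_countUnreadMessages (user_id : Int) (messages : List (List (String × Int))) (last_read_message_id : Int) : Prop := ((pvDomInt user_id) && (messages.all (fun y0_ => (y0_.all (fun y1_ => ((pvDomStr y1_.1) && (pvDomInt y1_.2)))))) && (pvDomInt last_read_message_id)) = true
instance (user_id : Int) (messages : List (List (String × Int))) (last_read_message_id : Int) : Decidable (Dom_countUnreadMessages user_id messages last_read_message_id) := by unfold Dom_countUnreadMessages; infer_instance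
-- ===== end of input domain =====

-- B replaces A's single backward scan with a break by two passes (find the index of the last
-- read message, then count the other user's messages in the suffix); same cost, different
-- decomposition. Equivalence is about the return value; neither program mutates its arguments.

-- ===== PORT A =====
-- message["id"] == last  : where the key is missing Python raises KeyError (excluded by Pre_);
-- the port reads the lookup as an Option, so `none` simply compares unequal to `some last`.
def msgIdMatches (last : Int) (m : List (String × Int)) : Bool :=
  PySem.Dict.get? (PySem.Dict.mk m) "id" == some last

-- message["senderId"] != user_id : KeyError cases are excluded by Pre_ likewise.
def msgFromOther (user_id : Int) (m : List (String × Int)) : Bool :=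
  PySem.Dict.get? (PySem.Dict.mk m) "senderId" != some user_id

-- the `for i in range(n-1, -1, -1)` loop with its break, as structural recursion on the index list
def aLoop (user_id last : Int) (messages : List (List (String × Int))) : List Int → Int → Int
  | [], cnt => cnt
  | i :: rest, cnt =>
      let message := PySem.List.pyGetD messages i []
      if msgIdMatches last message then cnt
      else aLoop user_id last messages rest
        (if msgFromOther user_id message then cnt + 1 else cnt)

def countUnreadMessages (user_id : Int) (messages : List (List (String × Int))) (last_read_message_id : Int) : Int :=
  aLoop user_id last_read_message_id messages
    (PySem.List.pyRange ((messages.length : Int) - 1) (-1) (-1)) 0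

-- ===== PORT B =====
-- first pass of Source B: boundary = index of the last message whose .get("id") equals the target, else -1
def bBoundary (last : Int) (messages : List (List (String × Int))) : Int :=
  (PySem.List.enumerate messages 0).foldl
    (fun b p => if msgIdMatches last p.2 then p.1 else b) (-1)

def countUnreadMessages_alt (user_id : Int) (messages : List (List (String × Int))) (last_read_message_id : Int) : Int :=
  (PySem.List.slice messages (some (bBoundary last_read_message_id messages + 1)) none).foldl
    (fun cnt m => if msgFromOther user_id m then cnt + 1 else cnt) 0

-- ===== PRECONDITION & SPEC =====
-- Pre_ excludes exactly the inputs on which Python A raises KeyError: every message that is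
-- reached by A's backward scan (no message with the read id strictly after it) must carry an
-- "id" key, and, when it is not the read message, a "senderId" key.
def Pre_countUnreadMessages (user_id : Int) (messages : List (List (String × Int))) (last_read_message_id : Int) : Prop :=
  ∀ i : Nat, i < messages.length →
    (∀ j : Nat, j < messages.length → i < j →
       PySem.Dict.get? (PySem.Dict.mk (messages.getD j [])) "id" ≠ some last_read_message_id) →
    ((PySem.Dict.get? (PySem.Dict.mk (messages.getD i [])) "id").isSome ∧
     (PySem.Dict.get? (PySem.Dict.mk (messages.getD i [])) "id" ≠ some last_read_message_id →
      (PySem.Dict.get? (PySem.Dict.mk (messages.getD i [])) "senderId").isSome))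
instance (user_id : Int) (messages : List (List (String × Int))) (last_read_message_id : Int) : Decidable (Pre_countUnreadMessages user_id messages last_read_message_id) := by unfold Pre_countUnreadMessages; infer_instance

def pvWitness_countUnreadMessages : Int × (List (List (String × Int))) × Int :=
  (1, [[("id", 5), ("senderId", 2)], [("id", 7), ("senderId", 2)]], 5)

def Spec_countUnreadMessages (user_id : Int) (messages : List (List (String × Int))) (last_read_message_id : Int) (out : Int) : Prop := out = countUnreadMessages_alt user_id messages last_read_message_id
instance (user_id : Int) (messages : List (List (String × Int))) (last_read_message_id : Int) (out : Int) : Decidable (Spec_countUnreadMessages user_id messages last_read_message_id out) := by unfold Spec_countUnreadMessages; infer_instance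

-- ===== CLAIM (what is proved, stated in full; the proofs are below) =====
def Claim_equal_countUnreadMessages : Prop := ∀ (user_id : Int) (messages : List (List (String × Int))) (last_read_message_id : Int), Dom_countUnreadMessages user_id messages last_read_message_id → Pre_countUnreadMessages user_id messages last_read_message_id → Spec_countUnreadMessages user_id messages last_read_message_id (countUnreadMessages user_id messages last_read_message_id)

-- ===== LEMMAS AND PROOFS =====

-- A's backward index loop, re-read as a scan over the list of the messages it visits
def scanRev (user_id last : Int) : List (List (String × Int)) → Int → Int
  | [], cnt => cnt
  | m :: rest, cnt =>
      if msgIdMatches last m then cnt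
      else scanRev user_id last rest (if msgFromOther user_id m then cnt + 1 else cnt)

lemma aLoop_eq_scanRev (u last : Int) (msgs : List (List (String × Int)))
    (is : List Int) (cnt : Int) :
    aLoop u last msgs is cnt
      = scanRev u last (is.map (fun i => PySem.List.pyGetD msgs i [])) cnt := by
  induction is generalizing cnt with
  | nil => rfl
  | cons i rest ih => simp [aLoop, scanRev, ih]

lemma countdown_map (msgs : List (List (String × Int))) :
    (PySem.List.pyRange ((msgs.length : Int) - 1) (-1) (-1)).map
        (fun i => PySem.List.pyGetD msgs i []) = msgs.reverse := by
  have h : PySem.List.pyRange ((msgs.length : Int) - 1) (-1) (-1)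
      = (PySem.List.pyRange 0 (msgs.length : Int) 1).reverse := by
    rw [PySem.List.pyRange_neg_one_eq_reverse]; norm_num
  rw [h, List.map_reverse, PySem.List.map_pyGetD_pyRange_zero']

lemma scanRev_acc (u last : Int) (r : List (List (String × Int))) (cnt : Int) :
    scanRev u last r cnt = cnt + scanRev u last r 0 := by
  induction r generalizing cnt with
  | nil => simp [scanRev]
  | cons m rest ih =>
      by_cases h : msgIdMatches last m
      · simp [scanRev, h]
      · simp only [scanRev, h, if_false, Bool.false_eq_true]
        rw [ih, @ih (if msgFromOther u m then 0 + 1 else 0)]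
        split_ifs <;> ring

lemma enumerate_append_singleton {α : Type} (xs : List α) (m : α) (s : Int) :
    PySem.List.enumerate (xs ++ [m]) s
      = PySem.List.enumerate xs s ++ [((s + xs.length : Int), m)] := by
  induction xs generalizing s with
  | nil => simp [PySem.List.enumerate_nil, PySem.List.enumerate_cons]
  | cons x xs ih =>
      simp only [List.cons_append, PySem.List.enumerate_cons, ih]
      simp
      ring_nf

lemma bBoundary_append (last : Int) (xs : List (List (String × Int))) (m : List (String × Int)) :
    bBoundary last (xs ++ [m])
      = if msgIdMatches last m then (xs.length : Int) else bBoundary last xs := by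
  unfold bBoundary
  rw [enumerate_append_singleton, List.foldl_append]
  simp

lemma bBoundary_bounds (last : Int) (xs : List (List (String × Int))) :
    -1 ≤ bBoundary last xs ∧ bBoundary last xs < (xs.length : Int) := by
  induction xs using List.reverseRecOn with
  | nil => simp [bBoundary, PySem.List.enumerate_nil]
  | append_singleton xs m ih =>
      rw [bBoundary_append]
      rcases ih with ⟨h1, h2⟩
      simp only [List.length_append, List.length_cons, List.length_nil]
      split_ifs <;> push_cast <;> omega

lemma main_eq (u : Int) (msgs : List (List (String × Int))) (last : Int) :
    scanRev u last msgs.reverse 0 = countUnreadMessages_alt u msgs last := by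
  induction msgs using List.reverseRecOn with
  | nil => simp [scanRev, countUnreadMessages_alt, bBoundary, PySem.List.enumerate_nil,
      PySem.List.slice]
  | append_singleton xs m ih =>
      rw [List.reverse_append]
      simp only [List.reverse_cons, List.reverse_nil, List.nil_append, List.singleton_append]
      unfold countUnreadMessages_alt
      rw [bBoundary_append]
      by_cases h : msgIdMatches last m
      · simp only [scanRev, h, if_true]
        have : PySem.List.slice (xs ++ [m]) (some ((xs.length : Int) + 1)) none
            = List.drop ((xs.length : Int) + 1).toNat (xs ++ [m]) := by
          rw [PySem.List.slice_from] ; omega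
        rw [this]
        have hlen : ((xs.length : Int) + 1).toNat = xs.length + 1 := by omega
        rw [hlen]
        rw [List.drop_eq_nil_of_le (by simp)]
        rfl
      · simp only [scanRev, h, if_false, Bool.false_eq_true]
        rw [scanRev_acc, ih]
        unfold countUnreadMessages_alt
        obtain ⟨hb1, hb2⟩ := bBoundary_bounds last xs
        have hnn : 0 ≤ bBoundary last xs + 1 := by omega
        rw [PySem.List.slice_from _ hnn, PySem.List.slice_from _ hnn]
        have hle : (bBoundary last xs + 1).toNat ≤ xs.length := by omega
        rw [List.drop_append_of_le_length hle, List.foldl_append]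
        simp only [List.foldl_cons, List.foldl_nil]
        split_ifs <;> ring

-- ===== VERDICT (by name: the statement is the Claim_ definition above) =====
theorem countUnreadMessages_spec : Claim_equal_countUnreadMessages := by
  intro u msgs last _ _
  unfold Spec_countUnreadMessages countUnreadMessages
  rw [aLoop_eq_scanRev, countdown_map, main_eq u msgs last]
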